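-- pv_equiv track=rewrite | github.com/MrBrantCode/unitest_baseline | mut_generate/mist_train_taco/taco_3425/solution.py | calculate_photo_sizes
-- ===== SOURCE A (Python) =====
-- def calculate_photo_sizes(n, wh):
--     # Calculate the total width of all friends
--     W = sum(w for w, h in wh)
--
--     # Calculate the prefix maximum heights
--     pref = [wh[0][1]]
--     for i in range(1, n):
--         pref.append(max(pref[-1], wh[i][1]))
--
--     # Calculate the suffix maximum heights
--     suff = [0] * (n - 1) + [wh[n - 1][1]]
--     for i in range(n - 2, -1, -1):
--         suff[i] = max(suff[i + 1], wh[i][1])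
--
--     # Calculate the minimum photo sizes for each friend
--     result = []
--     for i in range(n):
--         width_without_i = W - wh[i][0]
--         height_without_i = max(pref[i - 1] if i - 1 >= 0 else 0, suff[i + 1] if i + 1 < n else 0)
--         result.append(width_without_i * height_without_i)
--
--     return result
-- ===== SOURCE B (Python) =====
-- def calculate_photo_sizes(n, wh):
--     # total width once; for friend i the tallest of the other n-1 friends, read
--     # directly from the two slices around him (0 when a slice is empty)
--     W = sum(w for w, _ in wh)
--     hs = [h for _, h in wh]
--     return [(W - wh[i][0]) * max(max(hs[:i], default=0), max(hs[i + 1:n], default=0))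
--             for i in range(n)]
-- ===== Notes on version B (the rewrite author's own statement) =====
-- stated objective: simpler
-- what changed: Replaces A's three index-driven passes (prefix-max array, in-place-mutated suffix-max array, then a result loop combining them) with a single comprehension that reads each friend's neighbours' maximum height directly from the two surrounding slices.
import Mathlib
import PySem

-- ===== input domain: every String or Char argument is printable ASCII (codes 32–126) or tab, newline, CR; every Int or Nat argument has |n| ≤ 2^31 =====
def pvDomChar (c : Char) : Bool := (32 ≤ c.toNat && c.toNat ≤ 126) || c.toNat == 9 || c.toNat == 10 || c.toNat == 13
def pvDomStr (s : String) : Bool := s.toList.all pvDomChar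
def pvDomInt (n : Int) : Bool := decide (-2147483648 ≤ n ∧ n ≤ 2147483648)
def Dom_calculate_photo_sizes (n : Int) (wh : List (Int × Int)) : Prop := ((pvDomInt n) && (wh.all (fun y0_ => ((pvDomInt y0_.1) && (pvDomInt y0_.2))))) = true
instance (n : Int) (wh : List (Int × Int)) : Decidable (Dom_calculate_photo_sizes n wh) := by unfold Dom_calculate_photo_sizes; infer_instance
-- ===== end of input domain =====

-- B replaces A's three index-driven passes (prefix-max array, mutated suffix-max
-- array, result loop) by one comprehension reading each friend's neighbours'
-- maxima directly from the two surrounding slices (objective: simpler).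

-- ===== PORT A =====
def calculate_photo_sizes (n : Int) (wh : List (Int × Int)) : List Int :=
  let W := (wh.map (fun p => p.1)).sum
  let pref : List Int := [(PySem.List.pyGetD wh 0 ((0:Int),(0:Int))).2]
  let pref := (PySem.List.pyRange 1 n 1).foldl
    (fun pref i =>
      pref ++ [max (PySem.List.pyGetD pref (-1) 0) (PySem.List.pyGetD wh i ((0:Int),(0:Int))).2]) pref
  let suff : List Int :=
    PySem.List.pyRepeat [(0:Int)] (n - 1) ++ [(PySem.List.pyGetD wh (n - 1) ((0:Int),(0:Int))).2]
  let suff := (PySem.List.pyRange (n - 2) (-1) (-1)).foldl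
    (fun suff i =>
      PySem.List.pySetD suff i
        (max (PySem.List.pyGetD suff (i + 1) 0) (PySem.List.pyGetD wh i ((0:Int),(0:Int))).2)) suff
  (PySem.List.pyRange 0 n 1).foldl
    (fun res i =>
      let width_without_i := W - (PySem.List.pyGetD wh i ((0:Int),(0:Int))).1
      let height_without_i :=
        max (if 0 ≤ i - 1 then PySem.List.pyGetD pref (i - 1) 0 else 0)
            (if i + 1 < n then PySem.List.pyGetD suff (i + 1) 0 else 0)
      res ++ [width_without_i * height_without_i]) []

-- ===== PORT B =====
def calculate_photo_sizes_alt (n : Int) (wh : List (Int × Int)) : List Int :=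
  let W := (wh.map (fun p => p.1)).sum
  let hs := wh.map (fun p => p.2)
  (PySem.List.pyRange 0 n 1).map (fun i =>
    (W - (PySem.List.pyGetD wh i ((0:Int),(0:Int))).1) *
      max (PySem.List.maxD (PySem.List.slice hs none (some i)) id 0)
          (PySem.List.maxD (PySem.List.slice hs (some (i + 1)) (some n)) id 0))

-- ===== PRECONDITION & SPEC =====
-- Pre_ excludes exactly the inputs on which A raises IndexError (empty wh, or n out of
-- the range [1 - len(wh), len(wh)], where wh[0], wh[i] or wh[n - 1] is out of bounds).
def Pre_calculate_photo_sizes (n : Int) (wh : List (Int × Int)) : Prop :=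
  wh ≠ [] ∧ 1 - wh.length ≤ n ∧ n ≤ wh.length
instance (n : Int) (wh : List (Int × Int)) : Decidable (Pre_calculate_photo_sizes n wh) := by
  unfold Pre_calculate_photo_sizes; infer_instance

def pvWitness_calculate_photo_sizes : Int × (List (Int × Int)) := (2, [(3, 5), (4, 6)])

def Spec_calculate_photo_sizes (n : Int) (wh : List (Int × Int)) (out : List Int) : Prop :=
  out = calculate_photo_sizes_alt n wh
instance (n : Int) (wh : List (Int × Int)) (out : List Int) : Decidable (Spec_calculate_photo_sizes n wh out) := by
  unfold Spec_calculate_photo_sizes; infer_instance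

-- ===== CLAIM (what is proved, stated in full; the proofs are below) =====
def Claim_equal_calculate_photo_sizes : Prop := ∀ (n : Int) (wh : List (Int × Int)), Dom_calculate_photo_sizes n wh → Pre_calculate_photo_sizes n wh → Spec_calculate_photo_sizes n wh (calculate_photo_sizes n wh)

-- ===== LEMMAS AND PROOFS =====

theorem pv_foldl_max_max (a b : Int) (l : List Int) :
    l.foldl max (max a b) = max a (l.foldl max b) := by
  induction l generalizing b with
  | nil => rfl
  | cons x t ih =>
    simp only [List.foldl_cons, max_assoc]
    exact ih (max b x)

theorem pv_max?_cons (x : Int) (l : List Int) :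
    PySem.List.max? (x :: l) id = some (l.foldl max x) := by
  induction l generalizing x with
  | nil => rfl
  | cons y t ih =>
    have h1 : PySem.List.max? (x :: y :: t) id = PySem.List.max? (max x y :: t) id := by
      unfold PySem.List.max?
      simp only [List.foldl_cons]
      by_cases h : x < y
      · simp [h, max_eq_right h.le]
      · simp [h, max_eq_left (not_lt.mp h)]
    rw [h1, ih]
    simp only [List.foldl_cons]

theorem pv_maxD_cons (x : Int) (l : List Int) (d : Int) :
    PySem.List.maxD (x :: l) id d = l.foldl max x := by
  unfold PySem.List.maxD
  rw [pv_max?_cons]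
  rfl

theorem pv_maxD_nil (d : Int) : PySem.List.maxD ([] : List Int) id d = d := rfl

theorem pv_maxD_singleton (x d : Int) : PySem.List.maxD [x] id d = x := by
  rw [pv_maxD_cons]; rfl

theorem pv_maxD_append_singleton (l : List Int) (h : l ≠ []) (y : Int) :
    PySem.List.maxD (l ++ [y]) id 0 = max (PySem.List.maxD l id 0) y := by
  obtain ⟨x, t, rfl⟩ := List.exists_cons_of_ne_nil h
  rw [List.cons_append, pv_maxD_cons, pv_maxD_cons, List.foldl_append]
  rfl

theorem pv_maxD_cons_ne (x : Int) (l : List Int) (h : l ≠ []) :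
    PySem.List.maxD (x :: l) id 0 = max x (PySem.List.maxD l id 0) := by
  obtain ⟨z, t, rfl⟩ := List.exists_cons_of_ne_nil h
  rw [pv_maxD_cons, pv_maxD_cons]
  simp only [List.foldl_cons]
  exact pv_foldl_max_max x z t

theorem pv_pref_char (wh : List (Int × Int)) (k : Nat) (hk1 : 1 ≤ k) (hk : k ≤ wh.length) :
    (PySem.List.pyRange 1 (k : Int) 1).foldl
      (fun pref i => pref ++ [max (PySem.List.pyGetD pref (-1) 0)
        (PySem.List.pyGetD wh i ((0:Int),(0:Int))).2])
      [(PySem.List.pyGetD wh 0 ((0:Int),(0:Int))).2]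
    = (List.range k).map
        (fun i => PySem.List.maxD ((wh.map (fun p => p.2)).take (i+1)) id 0) := by
  induction k with
  | zero => omega
  | succ k ih =>
    by_cases hk0 : k = 0
    · subst hk0
      have hw : wh ≠ [] := by
        apply List.ne_nil_of_length_pos
        omega
      obtain ⟨p, t, rfl⟩ := List.exists_cons_of_ne_nil hw
      rw [show ((1:Nat) : Int) = 1 by norm_num, PySem.List.pyRange_one_eq_nil le_rfl]
      simp [PySem.List.pyGetD_zero_cons, pv_maxD_singleton]
    · have hk1' : 1 ≤ k := by omega
      have hkL : k ≤ wh.length := by omega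
      rw [show ((k+1 : Nat) : Int) = (k : Int) + 1 by push_cast; ring]
      rw [PySem.List.pyRange_one_succ_right (by exact_mod_cast hk1')]
      rw [List.foldl_append, ih hk1' hkL]
      simp only [List.foldl_cons, List.foldl_nil]
      rw [List.range_succ, List.map_append]
      have hne : (List.range k).map
          (fun i => PySem.List.maxD ((wh.map (fun p => p.2)).take (i+1)) id 0) ≠ [] := by
        simp [List.range_eq_nil, hk0]
      rw [PySem.List.pyGetD_neg_one _ _ hne, List.getLast_eq_getElem]
      have hlen : ((List.range k).map
          (fun i => PySem.List.maxD ((wh.map (fun p => p.2)).take (i+1)) id 0)).length = k := by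
        simp
      have hklt : k < wh.length := by omega
      have hgetwh : PySem.List.pyGetD wh ((k : Nat) : Int) ((0:Int),(0:Int)) = wh[k] := by
        rw [PySem.List.pyGetD_natCast]
        exact List.getD_eq_getElem wh _ hklt
      simp only [hlen, hgetwh, List.getElem_map, List.getElem_range]
      have htake : (wh.map (fun p => p.2)).take (k+1)
          = (wh.map (fun p => p.2)).take k ++ [(wh.map (fun p => p.2))[k]'(by simpa using hklt)] := by
        rw [List.take_add_one]
        simp [List.getElem?_eq_getElem (by simpa using hklt)]
      have htne : (wh.map (fun p => p.2)).take k ≠ [] := by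
        apply List.ne_nil_of_length_pos
        simp [hklt.le]
        omega
      rw [show k - 1 + 1 = k by omega]
      simp only [List.map_cons, List.map_nil]
      rw [htake, pv_maxD_append_singleton _ htne]
      simp

theorem pv_suff_char (wh : List (Int × Int)) (m : Nat) (hm : m ≤ wh.length) (j : Nat)
    (hj : j + 1 ≤ m) :
    (PySem.List.pyRange ((j : Int) - 1) (-1) (-1)).foldl
      (fun suff i => PySem.List.pySetD suff i
        (max (PySem.List.pyGetD suff (i + 1) 0) (PySem.List.pyGetD wh i ((0:Int),(0:Int))).2))
      (List.replicate j 0 ++ (List.range (m - j)).map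
        (fun t => PySem.List.maxD (((wh.map (fun p => p.2)).take m).drop (j + t)) id 0))
    = (List.range m).map
        (fun i => PySem.List.maxD (((wh.map (fun p => p.2)).take m).drop i) id 0) := by
  induction j with
  | zero =>
    rw [show ((0:Nat) : Int) - 1 = -1 by norm_num, PySem.List.pyRange_neg_one_eq_nil le_rfl]
    simp
  | succ j ih =>
    have hjlt : j + 1 < m := by omega
    rw [show ((j+1 : Nat) : Int) - 1 = (j : Int) by push_cast; ring]
    rw [PySem.List.pyRange_neg_one_cons (by omega)]
    rw [List.foldl_cons]
    have hstate : PySem.List.pySetD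
        (List.replicate (j+1) 0 ++ (List.range (m - (j+1))).map
          (fun t => PySem.List.maxD (((wh.map (fun p => p.2)).take m).drop ((j+1) + t)) id 0))
        ((j : Nat) : Int)
        (max (PySem.List.pyGetD
            (List.replicate (j+1) 0 ++ (List.range (m - (j+1))).map
              (fun t => PySem.List.maxD (((wh.map (fun p => p.2)).take m).drop ((j+1) + t)) id 0))
            (((j : Nat) : Int) + 1) 0)
          (PySem.List.pyGetD wh ((j : Nat) : Int) ((0:Int),(0:Int))).2)
      = List.replicate j 0 ++ (List.range (m - j)).map
          (fun t => PySem.List.maxD (((wh.map (fun p => p.2)).take m).drop (j + t)) id 0) := by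
      have hget1 : PySem.List.pyGetD
          (List.replicate (j+1) 0 ++ (List.range (m - (j+1))).map
            (fun t => PySem.List.maxD (((wh.map (fun p => p.2)).take m).drop ((j+1) + t)) id 0))
          (((j : Nat) : Int) + 1) 0
          = PySem.List.maxD (((wh.map (fun p => p.2)).take m).drop (j+1)) id 0 := by
        rw [show ((j : Nat) : Int) + 1 = ((j+1 : Nat) : Int) by push_cast; ring]
        rw [PySem.List.pyGetD_natCast]
        rw [List.getD_eq_getElem _ _ (by simp; omega)]
        rw [List.getElem_append_right (by simp)]
        simp
      have hgetwh : PySem.List.pyGetD wh ((j : Nat) : Int) ((0:Int),(0:Int)) = wh[j]'(by omega) := by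
        rw [PySem.List.pyGetD_natCast]
        exact List.getD_eq_getElem wh _ (by omega)
      have hdropne : ((wh.map (fun p => p.2)).take m).drop (j+1) ≠ [] := by
        apply List.ne_nil_of_length_pos
        simp
        omega
      have hv : max (PySem.List.maxD (((wh.map (fun p => p.2)).take m).drop (j+1)) id 0) (wh[j]'(by omega)).2
          = PySem.List.maxD (((wh.map (fun p => p.2)).take m).drop j) id 0 := by
        conv_rhs => rw [List.drop_eq_getElem_cons (show j < ((wh.map (fun p => p.2)).take m).length by simp; omega)]
        rw [pv_maxD_cons_ne _ _ hdropne]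
        simp [max_comm]
      rw [hget1, hgetwh, hv]
      rw [PySem.List.pySetD_natCast]
      rw [List.replicate_succ']
      rw [List.append_assoc]
      rw [List.set_append]
      simp only [List.length_replicate, lt_irrefl, if_false, Nat.sub_self]
      rw [List.singleton_append, List.set_cons_zero]
      congr 1
      rw [show m - j = (m - (j+1)) + 1 by omega, List.range_succ_eq_map]
      simp only [List.map_cons, List.map_map, Nat.add_zero]
      congr 1
      apply List.map_congr_left
      intro t _
      simp only [Function.comp]
      congr 2
      omega
    rw [hstate, ih (by omega)]

-- ===== VERDICT =====
theorem calculate_photo_sizes_spec : Claim_equal_calculate_photo_sizes := by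
  intro n wh _ hpre
  obtain ⟨hne, hlo, hhi⟩ := hpre
  unfold Spec_calculate_photo_sizes
  have hL : 0 < wh.length := List.length_pos_of_ne_nil hne
  by_cases hn0 : n ≤ 0
  · -- no friends asked for: both loops run over an empty range
    have hr : PySem.List.pyRange 0 n 1 = [] := PySem.List.pyRange_one_eq_nil hn0
    simp [calculate_photo_sizes, calculate_photo_sizes_alt, hr]
  · obtain ⟨m, rfl⟩ : ∃ m : Nat, n = (m : Int) := ⟨n.toNat, by omega⟩
    have hm1 : 1 ≤ m := by omega
    have hmL : m ≤ wh.length := by omega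
    -- A side
    simp only [calculate_photo_sizes]
    rw [pv_pref_char wh m hm1 hmL]
    have h1 : PySem.List.pyRepeat [(0:Int)] ((m:Int) - 1)
        = List.replicate (m - 1) (0:Int) := by
      rw [PySem.List.pyRepeat_singleton]
      congr 1
      omega
    have h2 : [(PySem.List.pyGetD wh ((m:Int) - 1) ((0:Int),(0:Int))).2]
        = (List.range (m - (m - 1))).map
            (fun t => PySem.List.maxD (((wh.map (fun p => p.2)).take m).drop ((m - 1) + t)) id 0) := by
      rw [show m - (m - 1) = 1 by omega]
      rw [show (m:Int) - 1 = ((m - 1 : Nat) : Int) by omega]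
      rw [PySem.List.pyGetD_natCast, List.getD_eq_getElem wh _ (by omega)]
      have hdrop : ((wh.map (fun p => p.2)).take m).drop (m - 1)
          = [((wh.map (fun p => p.2)).take m)[m - 1]'(by simp; omega)] := by
        rw [List.drop_eq_getElem_cons (by simp; omega)]
        rw [show m - 1 + 1 = m by omega]
        simp [List.drop_of_length_le]
      simp [hdrop, pv_maxD_singleton]
    have h3 : (m:Int) - 2 = ((m - 1 : Nat) : Int) - 1 := by omega
    rw [h1, h2, h3, pv_suff_char wh m hmL (m - 1) (by omega)]
    rw [PySem.List.foldl_append_singleton_eq_map]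
    simp only [List.nil_append]
    rw [PySem.List.pyRange_zero_nat, List.map_map]
    -- B side
    simp only [calculate_photo_sizes_alt]
    rw [PySem.List.pyRange_zero_nat, List.map_map]
    apply List.map_congr_left
    intro i hi
    simp only [Function.comp, List.mem_range] at *
    -- slices on the B side
    rw [PySem.List.slice_to_natCast]
    rw [show ((i:Nat):Int) + 1 = ((i+1:Nat):Int) by push_cast; ring]
    rw [PySem.List.slice_natCast]
    -- widths agree
    congr 1
    -- heights agree
    by_cases hi0 : i = 0
    · subst hi0
      rw [if_neg (show ¬ ((0:Int) ≤ ((0:Nat):Int) - 1) by norm_num)]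
      by_cases hlast : 0 + 1 < m
      · rw [if_pos (show (((0+1 : Nat)):Int) < ((m:Nat):Int) by exact_mod_cast hlast)]
        rw [PySem.List.pyGetD_natCast, List.getD_eq_getElem _ _ (by simp; omega)]
        simp [List.drop_take]
      · rw [if_neg (show ¬ ((((0+1 : Nat)):Int) < ((m:Nat):Int)) by push_cast; omega)]
        have hm1' : m = 1 := by omega
        subst hm1'
        simp
    · have htrue : (0:Int) ≤ ((i:Nat):Int) - 1 := by omega
      rw [if_pos htrue]
      rw [show ((i:Nat):Int) - 1 = ((i - 1 : Nat):Int) by omega]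
      rw [PySem.List.pyGetD_natCast, List.getD_eq_getElem _ _ (by simp; omega)]
      by_cases hlast : i + 1 < m
      · rw [if_pos (show (((i+1 : Nat)):Int) < ((m:Nat):Int) by exact_mod_cast hlast)]
        rw [PySem.List.pyGetD_natCast, List.getD_eq_getElem _ _ (by simp; omega)]
        simp only [List.getElem_map, List.getElem_range, List.drop_take]
        rw [show i - 1 + 1 = i by omega]
      · rw [if_neg (show ¬ ((((i+1 : Nat)):Int) < ((m:Nat):Int)) by push_cast; omega)]
        have hd : ((wh.map (fun p => p.2)).drop (i+1)).take (m - (i+1)) = [] := by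
          rw [show m - (i+1) = 0 by omega]
          simp
        simp only [List.getElem_map, List.getElem_range, hd, pv_maxD_nil]
        rw [show i - 1 + 1 = i by omega]
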